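-- pv_equiv track=rewrite | github.com/Infrapink/calconv | athenian_metonic_v.py | nouthi
-- ===== SOURCE A (Python) =====
-- leaps = (1, 4, 7, 9, 12, 15, 17) # if the year gives a remainder in this tuple when divided by 19, it's a leap year. See Hannah, p. 57. This tuple is adjusted to count from 0 rather than 1.
--
-- def nouthi(year):
--     '''Compute the tithis that have passed since the epoch at the start of the year'''
--     year = int(year)
--     if (year > 0):
--         year -= 1
--
--     y = 19 * (year // 19)
--     tithis = (year // 19) * 7050 # tithis that have passed since the epoch
--     while (y < year):
--         tithis += (30 * (12 + int((y % 19) in leaps)))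
--         y += 1
--
--     return tithis
-- ===== SOURCE B (Python) =====
-- leaps = (1, 4, 7, 9, 12, 15, 17)
-- # prefix table: _lcount[k] = number of leap remainders strictly below k
-- _lcount = [sum(1 for l in leaps if l < k) for k in range(19)]
--
-- def nouthi(year):
--     '''Compute the tithis that have passed since the epoch at the start of the year'''
--     year = int(year)
--     if year > 0:
--         year -= 1
--     r = year % 19
--     return (year // 19) * 7050 + 360 * r + 30 * _lcount[r]
-- ===== Notes on version B (the rewrite author's own statement) =====
-- stated objective: simpler
-- what changed: Replaces the per-year while-loop with its tuple membership test by a closed-form expression using a precomputed prefix table of leap remainders.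
import Mathlib
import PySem

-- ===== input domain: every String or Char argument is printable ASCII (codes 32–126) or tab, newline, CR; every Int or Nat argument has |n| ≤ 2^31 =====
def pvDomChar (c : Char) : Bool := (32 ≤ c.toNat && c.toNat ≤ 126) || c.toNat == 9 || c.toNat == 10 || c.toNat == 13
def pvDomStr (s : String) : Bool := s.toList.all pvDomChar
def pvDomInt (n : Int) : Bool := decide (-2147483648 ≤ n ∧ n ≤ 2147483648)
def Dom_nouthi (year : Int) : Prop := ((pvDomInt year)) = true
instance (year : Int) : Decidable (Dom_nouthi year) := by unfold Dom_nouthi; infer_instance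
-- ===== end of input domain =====

-- B replaces A's bounded while-loop by a closed form with a precomputed prefix table of leap remainders (simpler).


-- ===== PORT A =====
def leapsA : List Int := [1, 4, 7, 9, 12, 15, 17]

-- while (y < year): ... ; y += 1   ported as a fold over pyRange y year 1 (same iterates, same state)
def nouthi (year : Int) : Int :=
  let year := if year > 0 then year - 1 else year
  let y := 19 * (PySem.Int.floordiv year 19)
  let tithis := (PySem.Int.floordiv year 19) * 7050
  (PySem.List.pyRange y year 1).foldl
    (fun t yy => t + 30 * (12 + (if PySem.Int.mod yy 19 ∈ leapsA then (1 : Int) else 0)))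
    tithis

-- ===== PORT B =====
-- _lcount[k] = number of leap remainders strictly below k
def lcountB : List Int := [0, 0, 1, 1, 1, 2, 2, 2, 3, 3, 4, 4, 4, 5, 5, 5, 6, 6, 7]

def nouthi_alt (year : Int) : Int :=
  let year := if year > 0 then year - 1 else year
  let r := PySem.Int.mod year 19
  (PySem.Int.floordiv year 19) * 7050 + 360 * r + 30 * PySem.List.pyGetD lcountB r 0

-- ===== PRECONDITION & SPEC =====
def Spec_nouthi (year : Int) (out : Int) : Prop := out = nouthi_alt year
instance (year : Int) (out : Int) : Decidable (Spec_nouthi year out) := by unfold Spec_nouthi; infer_instance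

-- ===== CLAIM (what is proved, stated in full; the proofs are below) =====
def Claim_equal_nouthi : Prop := ∀ (year : Int), Dom_nouthi year → Spec_nouthi year (nouthi year)

-- ===== LEMMAS AND PROOFS =====

lemma core_eq (y : Int) :
    (PySem.List.pyRange (19 * PySem.Int.floordiv y 19) y 1).foldl
      (fun t yy => t + 30 * (12 + (if PySem.Int.mod yy 19 ∈ leapsA then (1 : Int) else 0)))
      ((PySem.Int.floordiv y 19) * 7050)
    = (PySem.Int.floordiv y 19) * 7050 + 360 * (PySem.Int.mod y 19)
        + 30 * PySem.List.pyGetD lcountB (PySem.Int.mod y 19) 0 := by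
  set q := PySem.Int.floordiv y 19 with hq
  set r := PySem.Int.mod y 19 with hr
  have hdiv : q * 19 + r = y := PySem.Int.floordiv_mul_add_mod y 19
  have hrb : 0 ≤ r ∧ r < 19 := by
    rw [hr, PySem.Int.mod_eq_emod_of_pos (show (0:Int) < 19 by norm_num)]
    omega
  have hy : y = 19 * q + r := by omega
  rw [hy, PySem.List.pyRange_one]
  have hnat : (19 * q + r - 19 * q).toNat = r.toNat := by omega
  rw [hnat]
  have hrn : r = (r.toNat : Int) := by omega
  have hlt : r.toNat < 19 := by omega
  rw [hrn]
  generalize r.toNat = n at hlt ⊢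
  interval_cases n <;>
    simp [List.range_succ, leapsA, lcountB, PySem.List.pyGetD, PySem.Int.mod] <;> ring

-- ===== VERDICT (by name: the statement is the Claim_ definition above) =====
theorem nouthi_spec : Claim_equal_nouthi := by
  intro year _
  unfold Spec_nouthi nouthi nouthi_alt
  by_cases h : year > 0 <;> simp only [h, if_pos, if_false] <;>
    exact core_eq _
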